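-- pv_equiv track=rewrite | github.com/toaa0422/python_leetcode | leetcode_daily2/interview46_translateNum.py | translateNum
-- ===== SOURCE A (Python) =====
-- def translateNum(num: int) -> int:
--     s = str(num)
--     a = b = 1
--     for i in range(2, len(s) + 1):
--         tmp = s[i - 2:i]
--         c = a + b if "10" <= tmp <= "25" else a
--         b = a
--         a = c
--     return a
-- ===== SOURCE B (Python) =====
-- def translateNum(num: int) -> int:
--     s = str(num)
--     n = len(s)
--     memo = {}
--
--     def dfs(i):
--         if i >= n:
--             return 1
--         if i in memo:
--             return memo[i]
--         res = dfs(i + 1)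
--         if i + 1 < n and "10" <= s[i:i + 2] <= "25":
--             res += dfs(i + 2)
--         memo[i] = res
--         return res
--
--     return dfs(0)
-- ===== Notes on version B (the rewrite author's own statement) =====
-- stated objective: alternative
-- what changed: Replaces A's bottom-up two-variable loop over prefixes with a memoized top-down recursion dfs(i) counting translations of the suffix s[i:].
import Mathlib
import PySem

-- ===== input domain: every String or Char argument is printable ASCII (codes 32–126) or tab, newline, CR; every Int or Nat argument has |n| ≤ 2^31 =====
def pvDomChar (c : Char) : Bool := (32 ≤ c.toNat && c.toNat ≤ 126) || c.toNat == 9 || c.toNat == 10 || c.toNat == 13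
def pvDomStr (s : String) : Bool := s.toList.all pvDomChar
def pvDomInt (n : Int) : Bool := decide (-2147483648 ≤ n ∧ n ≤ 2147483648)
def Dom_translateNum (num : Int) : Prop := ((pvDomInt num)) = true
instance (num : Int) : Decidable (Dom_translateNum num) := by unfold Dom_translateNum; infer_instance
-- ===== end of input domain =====

-- B replaces A's bottom-up two-variable loop over prefixes by a top-down recursion on the
-- suffix (memoized in Python); same O(n) cost, different decomposition.

-- Python's `<=` on strings: lexicographic comparison of code points (ported by hand; exact).
def pyStrLe : List Char → List Char → Bool
  | [], _ => true
  | _ :: _, [] => false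
  | a :: as, b :: bs => if a < b then true else if b < a then false else pyStrLe as bs

-- ===== PORT A =====
def translateNum (num : Int) : Int :=
  let s := PySem.Int.toChars num
  ((PySem.List.pyRange 2 ((s.length : Int) + 1) 1).foldl
    (fun (p : Int × Int) i =>
      let tmp := PySem.List.slice s (some (i - 2)) (some i)
      let c := if pyStrLe ['1', '0'] tmp && pyStrLe tmp ['2', '5'] then p.1 + p.2 else p.1
      (c, p.1)) (1, 1)).1

-- ===== PORT B =====
-- the two-char window test "10" <= s[i:i+2] <= "25" of Source B
def okWin (c d : Char) : Bool := pyStrLe ['1', '0'] [c, d] && pyStrLe [c, d] ['2', '5']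

-- dfs(i) of Source B, recursing on the suffix s[i:] (the Python memo dict is a pure evaluation cache)
def dfsB : List Char → Int
  | [] => 1
  | c :: rest =>
    let res := dfsB rest
    match rest with
    | [] => res
    | d :: rest2 => if okWin c d then res + dfsB rest2 else res

def translateNum_alt (num : Int) : Int := dfsB (PySem.Int.toChars num)

-- ===== PRECONDITION & SPEC =====
def Spec_translateNum (num : Int) (out : Int) : Prop := out = translateNum_alt num
instance (num : Int) (out : Int) : Decidable (Spec_translateNum num out) := by unfold Spec_translateNum; infer_instance

-- ===== CLAIM (what is proved, stated in full; the proofs are below) =====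
def Claim_equal_translateNum : Prop := ∀ (num : Int), Dom_translateNum num → Spec_translateNum num (translateNum num)

-- ===== LEMMAS AND PROOFS =====

-- A's loop with the previous character carried explicitly
def loopP : Int → Int → Char → List Char → Int × Int
  | a, b, _, [] => (a, b)
  | a, b, prev, c :: t => loopP (if okWin prev c then a + b else a) a c t

-- count of translations of t that start with a domino crossing prev/t.head
def cross (prev : Char) : List Char → Int
  | [] => 0
  | d :: r => if okWin prev d then dfsB r else 0

lemma dfsB_cons (c : Char) (t : List Char) : dfsB (c :: t) = dfsB t + cross c t := by
  cases t with
  | nil => simp [dfsB, cross]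
  | cons d r => simp only [dfsB, cross]; split_ifs <;> ring

lemma slice_two (s : List Char) (j : Nat) (prev c : Char) (t : List Char)
    (h : s.drop j = prev :: c :: t) :
    PySem.List.slice s (some (j : Int)) (some ((j : Int) + 2)) = [prev, c] := by
  have h2 : ((2 : Int)) = ((2 : Nat) : Int) := by norm_num
  rw [h2, PySem.List.slice_natCast_add, h]
  rfl

lemma foldA (s : List Char) : ∀ (t : List Char) (j : Nat) (prev : Char) (a b : Int),
    s.drop j = prev :: t →
    (PySem.List.pyRange ((j : Int) + 2) ((s.length : Int) + 1) 1).foldl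
      (fun (p : Int × Int) i =>
        let tmp := PySem.List.slice s (some (i - 2)) (some i)
        let c := if pyStrLe ['1', '0'] tmp && pyStrLe tmp ['2', '5'] then p.1 + p.2 else p.1
        (c, p.1)) (a, b) = loopP a b prev t := by
  intro t
  induction t with
  | nil =>
    intro j prev a b h
    have hlen : s.length = j + 1 := by
      have := congrArg List.length h
      simp [List.length_drop] at this
      omega
    rw [PySem.List.pyRange_one_eq_nil (by omega)]
    simp [loopP]
  | cons c t' ih =>
    intro j prev a b h
    have hlen : j + 2 ≤ s.length := by
      have := congrArg List.length h
      simp [List.length_drop] at this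
      omega
    rw [PySem.List.pyRange_one_cons (by omega)]
    simp only [List.foldl_cons]
    have hsl : PySem.List.slice s (some ((j : Int) + 2 - 2)) (some ((j : Int) + 2)) = [prev, c] := by
      have : (j : Int) + 2 - 2 = (j : Int) := by ring
      rw [this, slice_two s j prev c t' h]
    rw [hsl]
    have hdrop : s.drop (j + 1) = c :: t' := by
      have : s.drop (j + 1) = (s.drop j).drop 1 := by
        rw [List.drop_drop]
      rw [this, h]
      rfl
    have hcast : (j : Int) + 2 + 1 = ((j + 1 : Nat) : Int) + 2 := by push_cast; ring
    rw [hcast]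
    rw [ih (j + 1) c _ _ hdrop]
    simp only [loopP, okWin]
    rfl

lemma loopP_eval : ∀ (t : List Char) (a b : Int) (prev : Char),
    (loopP a b prev t).1 = a * dfsB t + b * cross prev t := by
  intro t
  induction t with
  | nil => intro a b prev; simp [loopP, dfsB, cross]
  | cons c t' ih =>
    intro a b prev
    simp only [loopP]
    rw [ih]
    rw [dfsB_cons c t']
    simp only [cross]
    split_ifs <;> ring

-- ===== VERDICT (by name: the statement is the Claim_ definition above) =====
theorem translateNum_spec : Claim_equal_translateNum := by
  intro num _
  unfold Spec_translateNum translateNum translateNum_alt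
  cases hs : PySem.Int.toChars num with
  | nil =>
    dsimp only
    rw [show ((List.length ([] : List Char) : Int) + 1) = 1 by simp]
    rw [PySem.List.pyRange_one_eq_nil (by norm_num)]
    simp [dfsB]
  | cons p t =>
    have hf := foldA (p :: t) t 0 p 1 1 rfl
    rw [show (((0 : Nat) : Int) + 2) = (2 : Int) by norm_num] at hf
    dsimp only at hf ⊢
    rw [hf, loopP_eval, dfsB_cons]
    ring
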